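-- pv_equiv track=rewrite | github.com/noteldar/hack_the_hack | projects/meeting-assassin/app/avatar/intelligence/meeting_analyzer.py | _determine_meeting_phase
-- ===== SOURCE A (Python) =====
-- from typing import List, Dict, Any, Optional, Tuple
--
-- def _determine_meeting_phase(transcript: List[Dict[str, Any]]) -> str:
--     """Determine current meeting phase"""
--     if not transcript:
--         return "not_started"
--
--     position = len(transcript)
--
--     if position < 5:
--         return "introduction"
--     elif position < 15:
--         return "warm_up"
--     elif any("agenda" in entry.get("text", "").lower() for entry in transcript[-5:]):
--         return "agenda_review"
--     elif any("decision" in entry.get("text", "").lower() for entry in transcript[-5:]):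
--         return "decision_making"
--     elif any("action" in entry.get("text", "").lower() for entry in transcript[-5:]):
--         return "action_planning"
--     elif any("next steps" in entry.get("text", "").lower() for entry in transcript[-5:]):
--         return "wrap_up"
--     else:
--         return "discussion"
-- ===== SOURCE B (Python) =====
-- # Table-driven single pass: one fold over the last five entries maintaining the
-- # best (lowest) matched keyword priority, instead of A's staged per-keyword scans.
-- _PHASES = [
--     ("agenda", "agenda_review"),
--     ("decision", "decision_making"),
--     ("action", "action_planning"),
--     ("next steps", "wrap_up"),
-- ]
--
-- def _determine_meeting_phase(transcript):
--     """Determine current meeting phase"""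
--     if not transcript:
--         return "not_started"
--     position = len(transcript)
--     if position < 5:
--         return "introduction"
--     if position < 15:
--         return "warm_up"
--     best = len(_PHASES)
--     for entry in transcript[-5:]:
--         text = entry.get("text", "").lower()
--         best = next((i for i, (kw, _) in enumerate(_PHASES[:best]) if kw in text), best)
--     return _PHASES[best][1] if best < len(_PHASES) else "discussion"
-- ===== Notes on version B (the rewrite author's own statement) =====
-- stated objective: alternative
-- what changed: A's if/elif chain of four separate any-scans over the last five entries is replaced by a keyword-priority table and a single fold over the entries that maintains the minimum matched priority (shrinking the candidate keyword set as it goes), with the phase looked up in the table at the end.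
import Mathlib
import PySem

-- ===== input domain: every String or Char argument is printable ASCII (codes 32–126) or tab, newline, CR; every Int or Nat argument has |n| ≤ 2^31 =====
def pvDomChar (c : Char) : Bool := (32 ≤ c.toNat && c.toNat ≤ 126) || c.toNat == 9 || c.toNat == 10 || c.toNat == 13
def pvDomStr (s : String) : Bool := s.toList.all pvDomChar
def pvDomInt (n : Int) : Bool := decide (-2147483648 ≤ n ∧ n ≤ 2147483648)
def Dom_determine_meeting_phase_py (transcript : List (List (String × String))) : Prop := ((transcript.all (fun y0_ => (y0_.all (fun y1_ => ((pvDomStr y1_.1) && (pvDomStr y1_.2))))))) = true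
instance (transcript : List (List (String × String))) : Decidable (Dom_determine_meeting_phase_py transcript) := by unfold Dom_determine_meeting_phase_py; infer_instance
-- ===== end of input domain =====

-- B replaces A's if/elif chain of four separate any-scans by a keyword-priority
-- table and one fold over the last five entries keeping the minimum matched
-- priority (objective: alternative — a single pass with an accumulator).

-- entry.get("text", "").lower(), shared by both ports
def pvTxt (e : List (String × String)) : String :=
  PySem.Str.lower (PySem.Dict.getD (PySem.Dict.mk e) "text" "")

-- ===== PORT A =====
def determine_meeting_phase_py (transcript : List (List (String × String))) : String :=
  if transcript = [] then "not_started"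
  else
    let position : Int := transcript.length
    if position < 5 then "introduction"
    else if position < 15 then "warm_up"
    else if (PySem.List.slice transcript (some (-5)) none).any
        (fun e => PySem.Str.isIn "agenda" (pvTxt e)) then "agenda_review"
    else if (PySem.List.slice transcript (some (-5)) none).any
        (fun e => PySem.Str.isIn "decision" (pvTxt e)) then "decision_making"
    else if (PySem.List.slice transcript (some (-5)) none).any
        (fun e => PySem.Str.isIn "action" (pvTxt e)) then "action_planning"
    else if (PySem.List.slice transcript (some (-5)) none).any
        (fun e => PySem.Str.isIn "next steps" (pvTxt e)) then "wrap_up"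
    else "discussion"

-- ===== PORT B =====
-- _PHASES
def pvPhases : List (String × String) :=
  [("agenda", "agenda_review"), ("decision", "decision_making"),
   ("action", "action_planning"), ("next steps", "wrap_up")]

-- best = next((i for i, (kw, _) in enumerate(_PHASES[:best]) if kw in text), best)
def pvStep (best : Nat) (text : String) : Nat :=
  match (pvPhases.take best).findIdx? (fun p => PySem.Str.isIn p.1 text) with
  | some i => i
  | none => best

def determine_meeting_phase_py_alt (transcript : List (List (String × String))) : String :=
  if transcript = [] then "not_started"
  else
    let position : Int := transcript.length
    if position < 5 then "introduction"
    else if position < 15 then "warm_up"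
    else
      let best := (PySem.List.slice transcript (some (-5)) none).foldl
        (fun b e => pvStep b (pvTxt e)) pvPhases.length
      match pvPhases[best]? with
      | some p => p.2
      | none => "discussion"

-- ===== PRECONDITION & SPEC =====
def Spec_determine_meeting_phase_py (transcript : List (List (String × String))) (out : String) : Prop := out = determine_meeting_phase_py_alt transcript
instance (transcript : List (List (String × String))) (out : String) : Decidable (Spec_determine_meeting_phase_py transcript out) := by unfold Spec_determine_meeting_phase_py; infer_instance

-- ===== CLAIM (what is proved, stated in full; the proofs are below) =====
def Claim_equal_determine_meeting_phase_py : Prop := ∀ (transcript : List (List (String × String))), Dom_determine_meeting_phase_py transcript → Spec_determine_meeting_phase_py transcript (determine_meeting_phase_py transcript)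

-- ===== LEMMAS AND PROOFS =====

-- first keyword index matching a single text (4 = none)
def pvG (t : String) : Nat :=
  if PySem.Str.isIn "agenda" t then 0
  else if PySem.Str.isIn "decision" t then 1
  else if PySem.Str.isIn "action" t then 2
  else if PySem.Str.isIn "next steps" t then 3
  else 4

-- first keyword index matched anywhere in the list (= A's chain outcome)
def pvGL (l : List (List (String × String))) : Nat :=
  if l.any (fun e => PySem.Str.isIn "agenda" (pvTxt e)) then 0
  else if l.any (fun e => PySem.Str.isIn "decision" (pvTxt e)) then 1
  else if l.any (fun e => PySem.Str.isIn "action" (pvTxt e)) then 2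
  else if l.any (fun e => PySem.Str.isIn "next steps" (pvTxt e)) then 3
  else 4

lemma pvGL_le (l : List (List (String × String))) : pvGL l ≤ 4 := by
  unfold pvGL; split_ifs <;> omega

lemma pvStep_eq (b : Nat) (hb : b ≤ 4) (t : String) : pvStep b t = min b (pvG t) := by
  interval_cases b <;>
    simp only [pvStep, pvPhases, pvG, List.take_succ_cons, List.take_zero, List.take_nil,
      List.findIdx?_cons, List.findIdx?_nil] <;>
    split_ifs <;> rfl

lemma pvMinChain : ∀ (a0 a1 a2 a3 b0 b1 b2 b3 : Bool),
    min (if a0 then 0 else if a1 then 1 else if a2 then 2 else if a3 then 3 else 4)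
        (if b0 then 0 else if b1 then 1 else if b2 then 2 else if b3 then 3 else 4)
    = if (a0 || b0) then (0:Nat) else if (a1 || b1) then 1 else if (a2 || b2) then 2
      else if (a3 || b3) then 3 else 4 := by decide

lemma pvGL_cons (e : List (String × String)) (l : List (List (String × String))) :
    pvGL (e :: l) = min (pvG (pvTxt e)) (pvGL l) := by
  unfold pvGL pvG
  simp only [List.any_cons]
  exact (pvMinChain _ _ _ _ _ _ _ _).symm

lemma pvFold (l : List (List (String × String))) :
    ∀ b, b ≤ 4 → l.foldl (fun b e => pvStep b (pvTxt e)) b = min b (pvGL l) := by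
  induction l with
  | nil => intro b hb; simp [pvGL]; omega
  | cons e l ih =>
    intro b hb
    simp only [List.foldl_cons, pvStep_eq b hb (pvTxt e)]
    rw [ih _ (le_trans (Nat.min_le_left _ _) hb), pvGL_cons, Nat.min_assoc]

-- ===== VERDICT (by name: the statement is the Claim_ definition above) =====
theorem determine_meeting_phase_py_spec : Claim_equal_determine_meeting_phase_py := by
  intro transcript _
  unfold Spec_determine_meeting_phase_py determine_meeting_phase_py determine_meeting_phase_py_alt
  by_cases h1 : transcript = []
  · simp [h1]
  simp only [if_neg h1]
  by_cases h2 : (transcript.length : Int) < 5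
  · simp [h2]
  simp only [if_neg h2]
  by_cases h3 : (transcript.length : Int) < 15
  · simp [h3]
  simp only [if_neg h3]
  have hfold : (PySem.List.slice transcript (some (-5)) none).foldl
      (fun b e => pvStep b (pvTxt e)) pvPhases.length
      = pvGL (PySem.List.slice transcript (some (-5)) none) := by
    rw [show pvPhases.length = 4 from rfl,
      pvFold _ 4 (le_refl 4), Nat.min_eq_right (pvGL_le _)]
  rw [hfold]
  unfold pvGL
  by_cases a0 : (PySem.List.slice transcript (some (-5)) none).any
      (fun e => PySem.Str.isIn "agenda" (pvTxt e))
  · rw [if_pos a0, if_pos a0]; rfl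
  rw [if_neg a0, if_neg a0]
  by_cases a1 : (PySem.List.slice transcript (some (-5)) none).any
      (fun e => PySem.Str.isIn "decision" (pvTxt e))
  · rw [if_pos a1, if_pos a1]; rfl
  rw [if_neg a1, if_neg a1]
  by_cases a2 : (PySem.List.slice transcript (some (-5)) none).any
      (fun e => PySem.Str.isIn "action" (pvTxt e))
  · rw [if_pos a2, if_pos a2]; rfl
  rw [if_neg a2, if_neg a2]
  by_cases a3 : (PySem.List.slice transcript (some (-5)) none).any
      (fun e => PySem.Str.isIn "next steps" (pvTxt e))
  · rw [if_pos a3, if_pos a3]; rfl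
  rw [if_neg a3, if_neg a3]
  rfl
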